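-- pv_equiv track=rewrite | github.com/pypi-data/pypi-mirror-51 | packages/ECCArithmetic/ECCArithmetic-1.0.0.tar.gz/ECCArithmetic-1.0.0/ECCArithmetic/ent.py | contfrac_rat
-- ===== SOURCE A (Python) =====
-- def contfrac_rat(numer, denom):
--     assert denom > 0, "denom must be positive"
--     a = numer
--     b = denom
--     v = []
--     while b != 0:
--         v.append(int(a / b))
--         (a, b) = (b, a % b)
--     return v
-- ===== SOURCE B (Python) =====
-- def remainders(a, b):
--     """Euclidean remainder chain starting at (a, b), ending at the last nonzero term."""
--     return [a] if b == 0 else [a] + remainders(b, a % b)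
--
-- def contfrac_rat(numer, denom):
--     assert denom > 0, "denom must be positive"
--     chain = remainders(numer, denom)
--     return [int(x / y) for x, y in zip(chain, chain[1:])]
-- ===== Notes on version B (the rewrite author's own statement) =====
-- stated objective: alternative
-- what changed: Two-stage formulation: first build the Euclidean remainder chain recursively, then map the truncated quotient over adjacent pairs of the chain, instead of one while-loop that mutates (a,b) and appends quotients to an accumulator.
import Mathlib
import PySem

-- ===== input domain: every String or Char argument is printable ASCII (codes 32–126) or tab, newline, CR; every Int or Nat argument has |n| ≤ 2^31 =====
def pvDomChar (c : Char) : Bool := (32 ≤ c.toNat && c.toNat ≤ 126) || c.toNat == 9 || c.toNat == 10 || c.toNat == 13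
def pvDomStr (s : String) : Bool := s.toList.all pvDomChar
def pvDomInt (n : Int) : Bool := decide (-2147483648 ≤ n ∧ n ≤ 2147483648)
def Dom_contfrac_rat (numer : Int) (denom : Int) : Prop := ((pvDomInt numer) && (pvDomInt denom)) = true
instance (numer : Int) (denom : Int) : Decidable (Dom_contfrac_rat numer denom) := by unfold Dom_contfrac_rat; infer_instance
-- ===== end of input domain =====

-- B replaces A's single while-loop (mutating (a,b) and appending to an accumulator)
-- by two stages: a recursive Euclidean remainder chain, then a zip/map pass taking
-- truncated quotients of adjacent pairs (objective: alternative decomposition).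
-- int(a / b) in Python is float division then truncation toward zero; on the stated
-- domain (|numer|, |denom| ≤ 2^31) the float quotient never rounds across an integer
-- boundary, so it equals Int.tdiv exactly.

-- termination helper, cited by both ports' recursions
theorem pvModNatAbsLt (a b : Int) (h : ¬ b = 0) : (PySem.Int.mod a b).natAbs < b.natAbs := by
  rcases lt_or_gt_of_ne h with hb | hb
  · have := PySem.Int.mod_neg_bounds a hb
    omega
  · have h1 := PySem.Int.mod_nonneg a hb
    have h2 := PySem.Int.mod_lt a hb
    omega

-- ===== PORT A =====
-- the while loop of A, carrying the accumulator v
def contfracLoop (a b : Int) (v : List Int) : List Int :=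
  if h : b = 0 then v
  else contfracLoop b (PySem.Int.mod a b) (v ++ [Int.tdiv a b])
termination_by b.natAbs
decreasing_by exact pvModNatAbsLt a b h

def contfrac_rat (numer : Int) (denom : Int) : List Int :=
  contfracLoop numer denom []

-- ===== PORT B =====
-- remainders(a, b): the Euclidean remainder chain, ending at the last nonzero term
def remChain (a b : Int) : List Int :=
  if h : b = 0 then [a] else a :: remChain b (PySem.Int.mod a b)
termination_by b.natAbs
decreasing_by exact pvModNatAbsLt a b h

-- [int(x / y) for x, y in zip(chain, chain[1:])]
def contfrac_rat_alt (numer : Int) (denom : Int) : List Int :=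
  let chain := remChain numer denom
  (chain.zip (chain.drop 1)).map (fun p => Int.tdiv p.1 p.2)

-- ===== PRECONDITION & SPEC =====
-- A (and B) assert denom > 0 (AssertionError otherwise); exactly those inputs are excluded.
def Pre_contfrac_rat (numer : Int) (denom : Int) : Prop := 0 < denom
instance (numer : Int) (denom : Int) : Decidable (Pre_contfrac_rat numer denom) := by unfold Pre_contfrac_rat; infer_instance
def pvWitness_contfrac_rat : Int × Int := (355, 113)

def Spec_contfrac_rat (numer : Int) (denom : Int) (out : List Int) : Prop := out = contfrac_rat_alt numer denom
instance (numer : Int) (denom : Int) (out : List Int) : Decidable (Spec_contfrac_rat numer denom out) := by unfold Spec_contfrac_rat; infer_instance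

-- ===== CLAIM =====
def Claim_equal_contfrac_rat : Prop := ∀ (numer : Int) (denom : Int), Dom_contfrac_rat numer denom → Pre_contfrac_rat numer denom → Spec_contfrac_rat numer denom (contfrac_rat numer denom)

-- ===== LEMMAS AND PROOFS =====

-- the remainder chain always starts with its first argument
theorem remChain_head (a b : Int) : remChain a b = a :: (remChain a b).tail := by
  rw [remChain]
  by_cases h : b = 0 <;> simp [h]

-- loop invariant: A's loop computes v ++ B's zip/map of the remainder chain
theorem contfracLoop_eq (b a : Int) (v : List Int) :
    contfracLoop a b v =
      v ++ ((remChain a b).zip ((remChain a b).drop 1)).map (fun p => Int.tdiv p.1 p.2) := by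
  induction hb : b.natAbs using Nat.strong_induction_on generalizing b a v with
  | _ n ih =>
    subst hb
    rw [contfracLoop, remChain]
    by_cases h : b = 0
    · simp [h]
    · simp only [h, dite_false]
      rw [ih _ (pvModNatAbsLt a b h) _ _ _ rfl]
      conv_rhs => rw [remChain_head b (PySem.Int.mod a b)]
      simp only [List.zip_cons_cons, List.map_cons, List.drop_one, List.tail_cons,
        List.append_assoc, List.cons_append, List.nil_append]
      rw [← remChain_head]

-- ===== VERDICT =====
theorem contfrac_rat_spec : Claim_equal_contfrac_rat := by
  intro numer denom _ _
  unfold Spec_contfrac_rat contfrac_rat contfrac_rat_alt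
  simpa using contfracLoop_eq denom numer []
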